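-- pv_equiv track=rewrite | github.com/bgrzesik/asd | sort_pretty_numbers.py | convert
-- ===== SOURCE A (Python) =====
-- def convert(num):
--     counts = [0] * 10
--
--     while num > 0:
--         counts[num % 10] += 1
--         num //= 10
--
--     ones = 0
--     multiple = 0
--
--     for e in counts:
--         if e == 1:
--             ones += 1
--         elif e != 0:
--             multiple += 1
--
--     return ones, multiple
-- ===== SOURCE B (Python) =====
-- def convert(num):
--     counts = [0] * 10
--     ones = 0
--     multiple = 0
--     while num > 0:
--         d = num % 10
--         counts[d] += 1
--         if counts[d] == 1:
--             ones += 1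
--         elif counts[d] == 2:
--             ones -= 1
--             multiple += 1
--         num //= 10
--     return ones, multiple
-- ===== Notes on version B (the rewrite author's own statement) =====
-- stated objective: alternative
-- what changed: B folds the second counting pass into the digit-extraction loop, adjusting ones/multiple online when a digit first appears and again when it becomes repeated, so the build-table-then-scan structure becomes a single online pass.
import Mathlib
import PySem

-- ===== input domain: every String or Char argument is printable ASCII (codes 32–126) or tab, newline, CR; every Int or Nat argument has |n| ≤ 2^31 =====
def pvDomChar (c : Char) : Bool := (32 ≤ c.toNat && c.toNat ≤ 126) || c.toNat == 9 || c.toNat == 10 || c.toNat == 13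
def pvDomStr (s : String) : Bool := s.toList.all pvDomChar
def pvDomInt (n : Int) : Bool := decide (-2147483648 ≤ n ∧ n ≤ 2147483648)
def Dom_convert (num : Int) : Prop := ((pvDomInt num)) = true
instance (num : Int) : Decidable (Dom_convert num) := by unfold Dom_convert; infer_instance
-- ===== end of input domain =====

-- B replaces A's build-a-count-table-then-scan structure by a single online pass
-- that updates `ones`/`multiple` as each digit's count reaches 1 or 2 (objective: alternative).

-- ===== PORT A =====
-- the while loop: extract digits, incrementing counts[num % 10]
def convertLoopA (num : Int) (counts : List Int) : List Int :=
  if num > 0 then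
    let d := (PySem.Int.mod num 10).toNat
    convertLoopA (PySem.Int.floordiv num 10) (counts.set d (counts.getD d 0 + 1))
  else counts
termination_by num.toNat
decreasing_by
  rw [PySem.Int.floordiv_eq_ediv_of_pos (by omega : (0:Int) < 10)]
  omega

def convert (num : Int) : Int × Int :=
  let counts := convertLoopA num (List.replicate 10 0)
  counts.foldl
    (fun om e => if e = 1 then (om.1 + 1, om.2) else if e ≠ 0 then (om.1, om.2 + 1) else om)
    ((0 : Int), (0 : Int))

-- ===== PORT B =====
-- single online loop: maintain ones/multiple while extracting digits
def convertLoopB (num : Int) (counts : List Int) (ones multiple : Int) : Int × Int :=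
  if num > 0 then
    let d := (PySem.Int.mod num 10).toNat
    let counts' := counts.set d (counts.getD d 0 + 1)
    if counts'.getD d 0 = 1 then
      convertLoopB (PySem.Int.floordiv num 10) counts' (ones + 1) multiple
    else if counts'.getD d 0 = 2 then
      convertLoopB (PySem.Int.floordiv num 10) counts' (ones - 1) (multiple + 1)
    else
      convertLoopB (PySem.Int.floordiv num 10) counts' ones multiple
  else (ones, multiple)
termination_by num.toNat
decreasing_by
  all_goals
    rw [PySem.Int.floordiv_eq_ediv_of_pos (by omega : (0:Int) < 10)]
    omega

def convert_alt (num : Int) : Int × Int :=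
  convertLoopB num (List.replicate 10 0) 0 0

-- ===== PRECONDITION & SPEC =====
def Spec_convert (num : Int) (out : Int × Int) : Prop := out = convert_alt num
instance (num : Int) (out : Int × Int) : Decidable (Spec_convert num out) := by unfold Spec_convert; infer_instance

-- ===== CLAIM (what is proved, stated in full; the proofs are below) =====
def Claim_equal_convert : Prop := ∀ (num : Int), Dom_convert num → Spec_convert num (convert num)

-- ===== LEMMAS AND PROOFS =====

def scanOnes (l : List Int) : Int := (l.countP (fun e => e == 1) : Int)
def scanMult (l : List Int) : Int := (l.countP (fun e => !(e == 1) && !(e == 0)) : Int)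

lemma foldl_scan (l : List Int) (a b : Int) :
    l.foldl
      (fun om e => if e = 1 then (om.1 + 1, om.2) else if e ≠ 0 then (om.1, om.2 + 1) else om)
      (a, b) = (a + scanOnes l, b + scanMult l) := by
  induction l generalizing a b with
  | nil => simp [scanOnes, scanMult]
  | cons x xs ih =>
    simp only [List.foldl_cons]
    by_cases h1 : x = 1
    · rw [if_pos h1, ih]
      simp [scanOnes, scanMult, h1]
      omega
    · by_cases h0 : x = 0
      · rw [if_neg h1, if_neg (by simp [h0]), ih]
        simp [scanOnes, scanMult, h0]
      · rw [if_neg h1, if_pos h0, ih]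
        simp [scanOnes, scanMult, h1, h0]
        omega

lemma countP_set (p : Int → Bool) (l : List Int) (d : Nat) (w : Int) (hd : d < l.length) :
    (l.set d w).countP p + (if p l[d] then 1 else 0)
      = l.countP p + (if p w then 1 else 0) := by
  induction l generalizing d with
  | nil => simp at hd
  | cons x xs ih =>
    cases d with
    | zero => simp [List.countP_cons]; split_ifs <;> omega
    | succ d' =>
      have h' := ih d' (by simpa using hd)
      simp only [List.set_cons_succ, List.countP_cons, List.getElem_cons_succ]
      split_ifs at h' ⊢ <;> omega

lemma loop_eq (n : Nat) (num : Int) (counts : List Int) (ones multiple : Int)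
    (hn : num.toNat = n) (hlen : counts.length = 10) (hpos : ∀ x ∈ counts, 0 ≤ x)
    (ho : ones = scanOnes counts) (hm : multiple = scanMult counts) :
    convertLoopB num counts ones multiple
      = (scanOnes (convertLoopA num counts), scanMult (convertLoopA num counts)) := by
  induction n using Nat.strong_induction_on generalizing num counts ones multiple with
  | _ n ih =>
  simp only [scanOnes, scanMult] at ho hm
  by_cases h : num > 0
  · have hm10 : (0:Int) < 10 := by omega
    have hmod0 : 0 ≤ PySem.Int.mod num 10 := PySem.Int.mod_nonneg num hm10
    have hmodlt : PySem.Int.mod num 10 < 10 := PySem.Int.mod_lt num hm10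
    set d := (PySem.Int.mod num 10).toNat with hdd
    have hd : d < counts.length := by rw [hlen]; omega
    have hget : counts.getD d 0 = counts[d] := List.getD_eq_getElem counts 0 hd
    set v := counts[d] with hv
    have hv0 : 0 ≤ v := hpos _ (List.getElem_mem hd)
    set counts' := counts.set d (counts.getD d 0 + 1) with hc'
    have hc2 : counts' = counts.set d (v + 1) := by rw [hc', hget]
    have hget' : counts'.getD d 0 = v + 1 := by
      rw [hc2, List.getD_eq_getElem _ _ (by simpa [hc2] using hd)]
      simp
    have hlen' : counts'.length = 10 := by simp [hc', hlen]
    have hpos' : ∀ x ∈ counts', 0 ≤ x := by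
      intro x hx
      rcases List.mem_or_eq_of_mem_set hx with hx' | hx'
      · exact hpos x hx'
      · rw [hx', hget]; omega
    have hones' := countP_set (fun e => e == 1) counts d (v + 1) hd
    have hmult' := countP_set (fun e => !(e == 1) && !(e == 0)) counts d (v + 1) hd
    rw [← hv] at hones' hmult'
    have hdec : (PySem.Int.floordiv num 10).toNat < n := by
      rw [PySem.Int.floordiv_eq_ediv_of_pos hm10]; omega
    have hih := fun o m ho' hm' =>
      ih _ hdec (PySem.Int.floordiv num 10) counts' o m rfl hlen' hpos' ho' hm'
    simp only [scanOnes, scanMult] at hih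
    rw [convertLoopA, convertLoopB, if_pos h, if_pos h]
    simp only [← hdd, ← hc']
    by_cases hz : v = 0
    · have e1 : ((v == 1) : Bool) = false := by simp [hz]
      have e2 : ((v + 1 == 1) : Bool) = true := by simp [hz]
      have e3 : (!(v == 1) && !(v == 0) : Bool) = false := by simp [hz]
      have e4 : (!(v + 1 == 1) && !(v + 1 == 0) : Bool) = false := by simp [hz]
      rw [e1, e2] at hones'
      rw [e3, e4] at hmult'
      simp at hones' hmult'
      rw [if_pos (by rw [hget']; omega)]
      refine hih _ _ ?_ ?_
      · rw [hc2]; omega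
      · rw [hc2]; omega
    · by_cases hone : v = 1
      · have e1 : ((v == 1) : Bool) = true := by simp [hone]
        have e2 : ((v + 1 == 1) : Bool) = false := by simp [hone]
        have e3 : (!(v == 1) && !(v == 0) : Bool) = false := by simp [hone]
        have e4 : (!(v + 1 == 1) && !(v + 1 == 0) : Bool) = true := by simp [hone]
        rw [e1, e2] at hones'
        rw [e3, e4] at hmult'
        simp at hones' hmult'
        rw [if_neg (by rw [hget']; omega), if_pos (by rw [hget']; omega)]
        refine hih _ _ ?_ ?_
        · rw [hc2]; omega
        · rw [hc2]; omega
      · rw [if_neg (by rw [hget']; omega), if_neg (by rw [hget']; omega)]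
        have e1 : ((v == 1) : Bool) = false := by simp [hone]
        have e2 : ((v + 1 == 1) : Bool) = false := by
          simp only [beq_eq_false_iff_ne, ne_eq]; omega
        have e3 : (!(v == 1) && !(v == 0) : Bool) = true := by simp [hone, hz]
        have e4 : (!(v + 1 == 1) && !(v + 1 == 0) : Bool) = true := by
          simp only [Bool.and_eq_true, Bool.not_eq_true', beq_eq_false_iff_ne, ne_eq]
          omega
        rw [e1, e2] at hones'
        rw [e3, e4] at hmult'
        simp at hones' hmult'
        refine hih _ _ ?_ ?_
        · rw [hc2]; omega
        · rw [hc2]; omega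
  · rw [convertLoopA, convertLoopB, if_neg h, if_neg h, ho, hm]
    simp [scanOnes, scanMult]

-- ===== VERDICT (by name: the statement is the Claim_ definition above) =====
theorem convert_spec : Claim_equal_convert := by
  intro num _
  unfold Spec_convert convert convert_alt
  rw [foldl_scan, loop_eq num.toNat num (List.replicate 10 0) 0 0 rfl (by simp)
    (by intro x hx; simp at hx; omega) (by decide) (by decide)]
  simp
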